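-- pv_equiv track=rewrite | github.com/ASSERT-KTH/QuantizedSAE | binary_feature_decomposition.py | binary_to_integer
-- ===== SOURCE A (Python) =====
-- def binary_to_integer(binary_vector, bits_per_dim=4):
--     """Convert binary representation back to integers."""
--     n_dims = len(binary_vector) // bits_per_dim
--     integers = []
--     for i in range(n_dims):
--         bits = binary_vector[i*bits_per_dim:(i+1)*bits_per_dim]
--         val = int(''.join(map(str, bits)), 2)
--         # Handle two's complement for negative numbers
--         if bits[0] == 1 and bits_per_dim > 1:
--             val = val - (1 << bits_per_dim)
--         integers.append(val)
--     return integers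
-- ===== SOURCE B (Python) =====
-- def binary_to_integer(binary_vector, bits_per_dim=4):
--     """Convert binary representation back to integers."""
--     if bits_per_dim <= 0 or len(binary_vector) < bits_per_dim:
--         return []
--     val = 0
--     for b in binary_vector[:bits_per_dim]:
--         val = 2 * val + b
--     if binary_vector[0] == 1 and bits_per_dim > 1:
--         val -= 1 << bits_per_dim
--     return [val] + binary_to_integer(binary_vector[bits_per_dim:], bits_per_dim)
-- ===== Notes on version B (the rewrite author's own statement) =====
-- stated objective: alternative
-- what changed: Replaces the index loop with string-concatenation + int(.,2) parsing by a recursive chunk decomposition that computes each value with a Horner fold (val = 2*val + b) directly on the ints.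
-- outside the precondition, e.g. on binary_to_integer([10, 1], 2): A returns [5], B returns [21]; on binary_to_integer([2, 1], 2): A raises ValueError, B returns [5]; on binary_to_integer([], 0): A raises ZeroDivisionError, B returns []
import Mathlib
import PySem

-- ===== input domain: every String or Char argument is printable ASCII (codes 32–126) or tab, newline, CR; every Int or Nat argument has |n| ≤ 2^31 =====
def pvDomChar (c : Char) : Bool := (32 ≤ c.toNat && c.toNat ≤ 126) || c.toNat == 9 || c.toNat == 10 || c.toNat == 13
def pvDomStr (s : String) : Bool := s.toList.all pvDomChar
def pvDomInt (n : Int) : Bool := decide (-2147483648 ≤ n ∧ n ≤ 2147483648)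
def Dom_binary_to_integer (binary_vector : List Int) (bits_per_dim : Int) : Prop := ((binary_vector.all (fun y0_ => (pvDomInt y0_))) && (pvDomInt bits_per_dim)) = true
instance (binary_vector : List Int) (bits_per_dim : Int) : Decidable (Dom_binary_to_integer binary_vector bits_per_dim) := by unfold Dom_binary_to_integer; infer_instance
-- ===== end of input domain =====

-- B replaces A's index loop with string-concatenation + int(.,2) parsing by a recursive chunk
-- decomposition computing each value with a Horner fold on the ints (equal return values on Pre_).

-- ===== PORT A =====
def binary_to_integer (binary_vector : List Int) (bits_per_dim : Int) : List Int :=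
  let n_dims := PySem.Int.floordiv binary_vector.length bits_per_dim
  (PySem.List.pyRange 0 n_dims 1).foldl (fun integers i =>
    let bits := PySem.List.slice binary_vector (some (i * bits_per_dim)) (some ((i + 1) * bits_per_dim))
    -- val = int(''.join(map(str, bits)), 2): the joined string is built with PySem.Int.toChars;
    -- the base-2 parse is ported by hand and is exact on Pre_ (every accessed entry is 0 or 1,
    -- so the string consists only of '0'/'1' characters).
    let s := bits.foldl (fun acc b => acc ++ PySem.Int.toChars b) []
    let val := s.foldl (fun a c => 2 * a + (if c = '1' then 1 else 0)) 0
    let val := if PySem.List.pyGet? bits 0 = some 1 ∧ bits_per_dim > 1 then val - 2 ^ bits_per_dim.toNat else val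
    integers ++ [val]) []

-- ===== PORT B =====
def binary_to_integer_alt (binary_vector : List Int) (bits_per_dim : Int) : List Int :=
  if h : bits_per_dim ≤ 0 ∨ (binary_vector.length : Int) < bits_per_dim then []
  else
    let val := (PySem.List.slice binary_vector (some 0) (some bits_per_dim)).foldl
                 (fun v b => 2 * v + b) 0
    let val := if PySem.List.pyGet? binary_vector 0 = some 1 ∧ bits_per_dim > 1 then val - 2 ^ bits_per_dim.toNat else val
    val :: binary_to_integer_alt (PySem.List.slice binary_vector (some bits_per_dim) none) bits_per_dim
termination_by binary_vector.length
decreasing_by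
  push_neg at h
  have h1 : ¬ bits_per_dim < 0 := by omega
  simp only [PySem.List.slice_some_none, List.length_drop, PySem.List.clampIdx, if_neg h1]
  omega

-- ===== PRECONDITION & SPEC =====
-- Pre_ restricts to the natural domain of a binary vector: bits_per_dim ≠ 0 (A raises
-- ZeroDivisionError on 0) and every entry A's loop accesses is 0 or 1 — on other entries A's
-- string parse raises ValueError or, when an entry happens to print as a base-2 numeral
-- (e.g. 10), accidentally parses the concatenation.
def Pre_binary_to_integer (binary_vector : List Int) (bits_per_dim : Int) : Prop :=
  bits_per_dim ≠ 0 ∧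
  (bits_per_dim < 0 ∨
    ∀ b ∈ binary_vector.take ((binary_vector.length / bits_per_dim.toNat) * bits_per_dim.toNat),
      b = 0 ∨ b = 1)
instance (binary_vector : List Int) (bits_per_dim : Int) : Decidable (Pre_binary_to_integer binary_vector bits_per_dim) := by unfold Pre_binary_to_integer; infer_instance

def pvWitness_binary_to_integer : List Int × Int := ([1, 0, 0, 1, 0, 1, 1, 0], 4)

def Spec_binary_to_integer (binary_vector : List Int) (bits_per_dim : Int) (out : List Int) : Prop := out = binary_to_integer_alt binary_vector bits_per_dim
instance (binary_vector : List Int) (bits_per_dim : Int) (out : List Int) : Decidable (Spec_binary_to_integer binary_vector bits_per_dim out) := by unfold Spec_binary_to_integer; infer_instance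

-- ===== CLAIM (what is proved, stated in full; the proofs are below) =====
def Claim_equal_binary_to_integer : Prop := ∀ (binary_vector : List Int) (bits_per_dim : Int), Dom_binary_to_integer binary_vector bits_per_dim → Pre_binary_to_integer binary_vector bits_per_dim → Spec_binary_to_integer binary_vector bits_per_dim (binary_to_integer binary_vector bits_per_dim)

-- ===== LEMMAS AND PROOFS =====

-- the per-chunk value A computes (string build + base-2 parse + two's-complement correction)
def chunkVal (bpd : Int) (bits : List Int) : Int :=
  let s := bits.foldl (fun acc b => acc ++ PySem.Int.toChars b) []
  let val := s.foldl (fun a c => 2 * a + (if c = '1' then 1 else 0)) 0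
  if PySem.List.pyGet? bits 0 = some 1 ∧ bpd > 1 then val - 2 ^ bpd.toNat else val

theorem A_eq_map (bv : List Int) (bpd : Int) :
    binary_to_integer bv bpd
      = (PySem.List.pyRange 0 (PySem.Int.floordiv bv.length bpd) 1).map
          (fun i => chunkVal bpd (PySem.List.slice bv (some (i * bpd)) (some ((i + 1) * bpd)))) := by
  unfold binary_to_integer chunkVal
  exact (PySem.List.foldl_append_singleton_eq_map _ _ []).trans (by simp)

theorem A_eq_mapG (bv : List Int) (k : Nat) :
    binary_to_integer bv (k : Int)
      = (List.range (bv.length / k)).map (fun j => chunkVal (k : Int) ((bv.drop (j * k)).take k)) := by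
  rw [A_eq_map, PySem.Int.floordiv_natCast, PySem.List.pyRange_one, List.map_map]
  simp only [Int.sub_zero, Int.toNat_natCast]
  refine List.map_congr_left (fun j _ => ?_)
  have h1 : (0 + (j : Int)) * (k : Int) = ((j * k : Nat) : Int) := by push_cast; ring
  have h2 : (0 + (j : Int) + 1) * (k : Int) = (((j + 1) * k : Nat) : Int) := by push_cast; ring
  simp only [Function.comp_apply, h1, h2, PySem.List.slice_natCast]
  congr 1
  rw [Nat.succ_mul, Nat.add_sub_cancel_left]

-- On a chunk of 0/1 entries, A's "build the string, parse base 2" equals B's Horner fold.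
theorem parse_eq_horner (bits : List Int) (cs : List Char) (hb : ∀ b ∈ bits, b = 0 ∨ b = 1) :
    (bits.foldl (fun acc b => acc ++ PySem.Int.toChars b) cs).foldl
        (fun a c => 2 * a + (if c = '1' then 1 else 0)) 0
      = bits.foldl (fun v b => 2 * v + b)
          (cs.foldl (fun a c => 2 * a + (if c = '1' then 1 else 0)) 0) := by
  have h0 : PySem.Int.toChars 0 = ['0'] := by decide
  have h1 : PySem.Int.toChars 1 = ['1'] := by decide
  induction bits generalizing cs with
  | nil => simp
  | cons b bs ih =>
    have hb0 : b = 0 ∨ b = 1 := hb b (by simp)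
    have hbs : ∀ x ∈ bs, x = 0 ∨ x = 1 := fun x hx => hb x (by simp [hx])
    simp only [List.foldl_cons]
    rw [ih _ hbs, List.foldl_append]
    rcases hb0 with h | h <;> subst h <;> simp [h0, h1]

theorem floordiv_nonpos_of_neg (a : Nat) (b : Int) (hb : b < 0) :
    PySem.Int.floordiv (a : Int) b ≤ 0 := by
  obtain ⟨n, rfl⟩ := Int.eq_negSucc_of_lt_zero hb
  cases a with
  | zero => simp [PySem.Int.floordiv, Int.fdiv]
  | succ m =>
    have : PySem.Int.floordiv ((m + 1 : Nat) : Int) (Int.negSucc n) = Int.negSucc (m / (n + 1)) := rfl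
    rw [this]
    exact le_of_lt (Int.negSucc_lt_zero _)

theorem binary_to_integer_neg (bv : List Int) (bpd : Int) (h : bpd < 0) :
    binary_to_integer bv bpd = [] := by
  rw [A_eq_map, PySem.List.pyRange_one_eq_nil (floordiv_nonpos_of_neg bv.length bpd h), List.map_nil]

theorem binary_to_integer_spec_aux (k : Nat) (hk : 1 ≤ k) :
    ∀ (n : Nat) (bv : List Int), bv.length ≤ n →
      (∀ b ∈ bv.take ((bv.length / k) * k), b = 0 ∨ b = 1) →
      binary_to_integer bv (k : Int) = binary_to_integer_alt bv (k : Int) := by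
  intro n
  induction n with
  | zero =>
    intro bv hlen _
    have hs : bv.length < k := by omega
    rw [A_eq_mapG, Nat.div_eq_of_lt hs, binary_to_integer_alt.eq_def,
      dif_pos (Or.inr (by exact_mod_cast hs))]
    simp
  | succ n ih =>
    intro bv hlen hbin
    by_cases hs : bv.length < k
    · rw [A_eq_mapG, Nat.div_eq_of_lt hs, binary_to_integer_alt.eq_def,
        dif_pos (Or.inr (by exact_mod_cast hs))]
      simp
    · have hlen' : k ≤ bv.length := not_lt.1 hs
      have hn0 : 1 ≤ bv.length / k := (Nat.one_le_div_iff (by omega)).2 hlen'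
      obtain ⟨m, hm⟩ : ∃ m, bv.length / k = m + 1 := ⟨bv.length / k - 1, by omega⟩
      have hdroplen : (bv.drop k).length = bv.length - k := by simp
      have hmdiv : (bv.drop k).length / k = m := by
        rw [hdroplen]
        have heq : bv.length - k + k = bv.length := Nat.sub_add_cancel hlen'
        have h2 : (bv.length - k + k) / k = (bv.length - k) / k + 1 := Nat.add_div_right _ (by omega)
        rw [heq] at h2
        omega
      -- the chunk entries are 0/1
      have hhead : ∀ b ∈ bv.take k, b = 0 ∨ b = 1 := by
        intro b hb
        apply hbin
        have hkle : k ≤ bv.length / k * k := by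
          calc k = 1 * k := (one_mul k).symm
          _ ≤ bv.length / k * k := Nat.mul_le_mul_right k hn0
        have : bv.take k = (bv.take (bv.length / k * k)).take k := by
          rw [List.take_take, min_eq_left hkle]
        rw [this] at hb
        exact List.take_subset _ _ hb
      -- precondition for the recursive call
      have hbin' : ∀ b ∈ (bv.drop k).take (((bv.drop k).length / k) * k), b = 0 ∨ b = 1 := by
        intro b hb
        rw [hmdiv, List.take_drop] at hb
        apply hbin
        have : k + m * k ≤ bv.length / k * k := by rw [hm]; rw [Nat.succ_mul]; omega
        have hsub : (bv.take (k + m * k)) = (bv.take (bv.length / k * k)).take (k + m * k) := by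
          rw [List.take_take, min_eq_left this]
        rw [hsub] at hb
        exact List.take_subset _ _ (List.drop_subset _ _ hb)
      have hslice0 : PySem.List.slice bv (some 0) (some (k : Int)) = bv.take k := by
        simpa using PySem.List.slice_natCast bv 0 k
      have hsliceFrom : PySem.List.slice bv (some (k : Int)) none = bv.drop k := by
        simpa using PySem.List.slice_from_natCast bv k
      -- unfold both sides one step
      rw [A_eq_mapG, hm, List.range_succ_eq_map, List.map_cons, List.map_map,
        binary_to_integer_alt.eq_def,
        dif_neg (by push_neg; constructor <;> omega)]
      simp only [hslice0, hsliceFrom]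
      congr 1
      · -- heads agree
        simp only [Nat.zero_mul, List.drop_zero]
        unfold chunkVal
        show (if PySem.List.pyGet? (List.take k bv) 0 = some 1 ∧ (k : Int) > 1
              then List.foldl (fun a c => 2 * a + if c = '1' then 1 else 0) 0
                     (List.foldl (fun acc b => acc ++ PySem.Int.toChars b) [] (List.take k bv))
                   - 2 ^ ((k : Int)).toNat
              else List.foldl (fun a c => 2 * a + if c = '1' then 1 else 0) 0
                     (List.foldl (fun acc b => acc ++ PySem.Int.toChars b) [] (List.take k bv))) = _
        rw [parse_eq_horner _ _ (by simpa using hhead)]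
        have hget : PySem.List.pyGet? (bv.take k) 0 = PySem.List.pyGet? bv 0 := by
          rw [PySem.List.pyGet?_zero, PySem.List.pyGet?_zero, List.getElem?_take, if_pos (by omega)]
        simp only [List.foldl_nil, hget]
      · -- tails agree: shifting the chunk index by one is chunking the k-dropped list
        rw [← ih (bv.drop k) (by rw [hdroplen]; omega) hbin']
        rw [A_eq_mapG, hmdiv]
        refine List.map_congr_left (fun j _ => ?_)
        simp only [Function.comp_apply]
        congr 2
        rw [List.drop_drop, Nat.succ_mul, Nat.add_comm (j * k) k]

-- ===== VERDICT (by name: the statement is the Claim_ definition above) =====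
theorem binary_to_integer_spec : Claim_equal_binary_to_integer := by
  intro bv bpd _ hpre
  obtain ⟨hne, hbin⟩ := hpre
  unfold Spec_binary_to_integer
  rcases lt_or_gt_of_ne hne with hneg | hpos
  · rw [binary_to_integer_neg bv bpd hneg, binary_to_integer_alt.eq_def,
      dif_pos (Or.inl (le_of_lt hneg))]
  · have hk : bpd = ((bpd.toNat : Nat) : Int) := by omega
    rw [hk]
    exact binary_to_integer_spec_aux bpd.toNat (by omega) bv.length bv le_rfl
      (hbin.resolve_left (by omega))
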